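-- pv_equiv track=rewrite | github.com/LatencyTDH/coding-competitions | wc158/q2.py | is_attacking_king
-- ===== SOURCE A (Python) =====
-- def is_attacking_king(queen, king, queens):
-- 	dirs = ((1,0), (-1, 0), (1,1), (-1, -1), (0, 1), (0, -1), (-1, 1), (1, -1))
-- 	for dv in dirs:
-- 		r, c = queen
-- 		dr, dc = dv
-- 		while 0 <= r + dr < 8 and 0 <= c+dc < 8 and (r+dr, c+dc) not in queens:
-- 			r += dr
-- 			c += dc
-- 			if (r, c) == king:
-- 				return True
-- 	return False
-- ===== SOURCE B (Python) =====
-- def is_attacking_king(queen, king, queens):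
--     dr = king[0] - queen[0]
--     dc = king[1] - queen[1]
--     if dr == 0 and dc == 0:
--         return False
--     if not (dr == 0 or dc == 0 or abs(dr) == abs(dc)):
--         return False
--     sr = (dr > 0) - (dr < 0)
--     sc = (dc > 0) - (dc < 0)
--     r, c = queen
--     for _ in range(max(abs(dr), abs(dc))):
--         r += sr
--         c += sc
--         if not (0 <= r < 8 and 0 <= c < 8) or (r, c) in queens:
--             return False
--     return True
-- ===== Notes on version B (the rewrite author's own statement) =====
-- stated objective: simpler
-- what changed: Replaces the eight-direction ray scan with a single alignment test (dr==0 or dc==0 or |dr|==|dc|) followed by one directed walk from the queen toward the king, checking board bounds and blockers along the way.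
import Mathlib
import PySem

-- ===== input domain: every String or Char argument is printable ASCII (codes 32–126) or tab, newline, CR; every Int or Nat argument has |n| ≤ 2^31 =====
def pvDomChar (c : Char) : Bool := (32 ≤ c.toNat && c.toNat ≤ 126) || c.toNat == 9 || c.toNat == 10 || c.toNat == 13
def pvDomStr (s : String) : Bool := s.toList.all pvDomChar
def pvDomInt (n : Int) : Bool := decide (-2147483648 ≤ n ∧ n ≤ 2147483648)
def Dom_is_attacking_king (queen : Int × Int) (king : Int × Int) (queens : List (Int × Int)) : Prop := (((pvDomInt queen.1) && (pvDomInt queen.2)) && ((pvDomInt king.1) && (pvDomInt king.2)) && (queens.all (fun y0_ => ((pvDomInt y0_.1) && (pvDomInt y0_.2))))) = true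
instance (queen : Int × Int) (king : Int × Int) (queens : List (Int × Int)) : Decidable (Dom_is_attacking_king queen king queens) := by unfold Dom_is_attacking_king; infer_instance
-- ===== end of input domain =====

-- B replaces A's eight-direction ray scan by a single alignment test plus one directed walk toward the king (simpler).


-- ===== PORT A =====
-- A's inner `while` loop for one direction (dr, dc). `fuel = 16` is a safe upper bound on
-- its iteration count: every square the loop steps onto lies on the 8×8 board and the
-- squares along a ray are pairwise distinct, so the body runs at most 8 times.
def walkA (king : Int × Int) (queens : List (Int × Int)) (dr dc : Int) : Nat → Int → Int → Bool
  | 0, _, _ => false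
  | fuel + 1, r, c =>
    if 0 ≤ r + dr ∧ r + dr < 8 ∧ 0 ≤ c + dc ∧ c + dc < 8 ∧ (r + dr, c + dc) ∉ queens then
      if (r + dr, c + dc) = king then true
      else walkA king queens dr dc fuel (r + dr) (c + dc)
    else false

def is_attacking_king (queen : Int × Int) (king : Int × Int) (queens : List (Int × Int)) : Bool :=
  [((1 : Int), (0 : Int)), (-1, 0), (1, 1), (-1, -1), (0, 1), (0, -1), (-1, 1), (1, -1)].any
    (fun dv => walkA king queens dv.1 dv.2 16 queen.1 queen.2)

-- ===== PORT B =====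
-- Python's (x > 0) - (x < 0)
def pySign (x : Int) : Int := (if x > 0 then 1 else 0) - (if x < 0 then 1 else 0)

-- B's `for _ in range(...)` walk: step by (sr, sc), fail on leaving the board or a blocker.
def walkB (queens : List (Int × Int)) (sr sc : Int) : Nat → Int → Int → Bool
  | 0, _, _ => true
  | n + 1, r, c =>
    if ¬ (0 ≤ r + sr ∧ r + sr < 8 ∧ 0 ≤ c + sc ∧ c + sc < 8) ∨ (r + sr, c + sc) ∈ queens then
      false
    else walkB queens sr sc n (r + sr) (c + sc)

def is_attacking_king_alt (queen : Int × Int) (king : Int × Int) (queens : List (Int × Int)) : Bool :=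
  let dr := king.1 - queen.1
  let dc := king.2 - queen.2
  if dr = 0 ∧ dc = 0 then false
  else if ¬ (dr = 0 ∨ dc = 0 ∨ dr.natAbs = dc.natAbs) then false
  else walkB queens (pySign dr) (pySign dc) (max dr.natAbs dc.natAbs) queen.1 queen.2

-- ===== PRECONDITION & SPEC =====
def Spec_is_attacking_king (queen : Int × Int) (king : Int × Int) (queens : List (Int × Int)) (out : Bool) : Prop := out = is_attacking_king_alt queen king queens
instance (queen : Int × Int) (king : Int × Int) (queens : List (Int × Int)) (out : Bool) : Decidable (Spec_is_attacking_king queen king queens out) := by unfold Spec_is_attacking_king; infer_instance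

-- ===== CLAIM (what is proved, stated in full; the proofs are below) =====
def Claim_equal_is_attacking_king : Prop := ∀ (queen : Int × Int) (king : Int × Int) (queens : List (Int × Int)), Dom_is_attacking_king queen king queens → Spec_is_attacking_king queen king queens (is_attacking_king queen king queens)

-- ===== LEMMAS AND PROOFS =====

-- a square is steppable: on the board and not occupied by a queen
def Ok (queens : List (Int × Int)) (p : Int × Int) : Prop :=
  0 ≤ p.1 ∧ p.1 < 8 ∧ 0 ≤ p.2 ∧ p.2 < 8 ∧ p ∉ queens

-- the j-th square on the ray from (r, c) in direction (dr, dc)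
def posP (r c dr dc : Int) (j : Nat) : Int × Int := (r + j * dr, c + j * dc)

theorem posP_one (r c dr dc : Int) : posP r c dr dc 1 = (r + dr, c + dc) := by
  simp [posP]

theorem posP_shift (r c dr dc : Int) (j : Nat) :
    posP (r + dr) (c + dc) dr dc j = posP r c dr dc (j + 1) := by
  simp only [posP, Prod.mk.injEq]
  push_cast
  constructor <;> ring

theorem walkA_iff (king : Int × Int) (queens : List (Int × Int)) (dr dc : Int)
    (fuel : Nat) (r c : Int) :
    walkA king queens dr dc fuel r c = true ↔
      ∃ k : Nat, 1 ≤ k ∧ k ≤ fuel ∧ posP r c dr dc k = king ∧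
        ∀ j : Nat, 1 ≤ j → j ≤ k → Ok queens (posP r c dr dc j) := by
  induction fuel generalizing r c with
  | zero =>
    simp only [walkA, Bool.false_eq_true, false_iff]
    rintro ⟨k, h1, h0, -⟩
    omega
  | succ fuel ih =>
    simp only [walkA]
    by_cases hok : 0 ≤ r + dr ∧ r + dr < 8 ∧ 0 ≤ c + dc ∧ c + dc < 8 ∧ (r + dr, c + dc) ∉ queens
    · rw [if_pos hok]
      have hOk1 : Ok queens (posP r c dr dc 1) := by
        rw [posP_one]
        exact ⟨hok.1, hok.2.1, hok.2.2.1, hok.2.2.2.1, hok.2.2.2.2⟩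
      by_cases hkg : (r + dr, c + dc) = king
      · rw [if_pos hkg]
        refine ⟨fun _ => ⟨1, le_refl 1, by omega, by rw [posP_one]; exact hkg, ?_⟩, fun _ => rfl⟩
        intro j h1 h2
        have hj : j = 1 := by omega
        subst hj
        exact hOk1
      · rw [if_neg hkg, ih]
        constructor
        · rintro ⟨k, h1, hf, hpos, hall⟩
          refine ⟨k + 1, by omega, by omega, by rw [← posP_shift]; exact hpos, ?_⟩
          intro j hj1 hjk
          rcases Nat.lt_or_ge j 2 with h | h
          · have hj : j = 1 := by omega
            subst hj
            exact hOk1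
          · obtain ⟨m, rfl⟩ : ∃ m, j = m + 1 := ⟨j - 1, by omega⟩
            rw [← posP_shift]
            exact hall m (by omega) (by omega)
        · rintro ⟨k, h1, hf, hpos, hall⟩
          have h2 : 2 ≤ k := by
            by_contra hcon
            have hk1 : k = 1 := by omega
            subst hk1
            rw [posP_one] at hpos
            exact hkg hpos
          obtain ⟨m, rfl⟩ : ∃ m, k = m + 1 := ⟨k - 1, by omega⟩
          refine ⟨m, by omega, by omega, by rw [posP_shift]; exact hpos, ?_⟩
          intro j hj1 hjm
          rw [posP_shift]
          exact hall (j + 1) (by omega) (by omega)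
    · rw [if_neg hok]
      simp only [Bool.false_eq_true, false_iff]
      rintro ⟨k, h1, hf, hpos, hall⟩
      have h := hall 1 (le_refl 1) h1
      rw [posP_one] at h
      exact hok ⟨h.1, h.2.1, h.2.2.1, h.2.2.2.1, h.2.2.2.2⟩

theorem walkB_iff (queens : List (Int × Int)) (sr sc : Int) (n : Nat) (r c : Int) :
    walkB queens sr sc n r c = true ↔
      ∀ j : Nat, 1 ≤ j → j ≤ n → Ok queens (posP r c sr sc j) := by
  induction n generalizing r c with
  | zero =>
    constructor
    · intro _ j h1 h2
      exact absurd h2 (by omega)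
    · intro _
      rfl
  | succ n ih =>
    simp only [walkB]
    by_cases hbad : ¬ (0 ≤ r + sr ∧ r + sr < 8 ∧ 0 ≤ c + sc ∧ c + sc < 8) ∨ (r + sr, c + sc) ∈ queens
    · rw [if_pos hbad]
      simp only [Bool.false_eq_true, false_iff]
      intro hall
      have h1 := hall 1 (le_refl 1) (by omega)
      rw [posP_one] at h1
      rcases hbad with h | h
      · exact h ⟨h1.1, h1.2.1, h1.2.2.1, h1.2.2.2.1⟩
      · exact h1.2.2.2.2 h
    · rw [if_neg hbad, ih]
      push_neg at hbad
      constructor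
      · intro hall j hj1 hjn
        rcases Nat.lt_or_ge j 2 with h | h
        · have hj : j = 1 := by omega
          subst hj
          rw [posP_one]
          exact ⟨hbad.1.1, hbad.1.2.1, hbad.1.2.2.1, hbad.1.2.2.2, hbad.2⟩
        · obtain ⟨m, rfl⟩ : ∃ m, j = m + 1 := ⟨j - 1, by omega⟩
          rw [← posP_shift]
          exact hall m (by omega) (by omega)
      · intro hall j hj1 hjn
        rw [posP_shift]
        exact hall (j + 1) (by omega) (by omega)

theorem pySign_cases (x : Int) :
    (0 < x ∧ pySign x = 1) ∨ (x < 0 ∧ pySign x = -1) ∨ (x = 0 ∧ pySign x = 0) := by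
  unfold pySign
  split_ifs <;> omega

-- the only direction d with |d| ≤ 1 whose k-th step (k ≥ 1) lands on the king is the sign
-- direction, and k is then the Chebyshev distance
theorem dir_uniq (q1 q2 k1 k2 d1 d2 : Int) (k : Nat) (hk : 1 ≤ k)
    (hd1 : d1.natAbs ≤ 1) (hd2 : d2.natAbs ≤ 1) (hd : ¬(d1 = 0 ∧ d2 = 0))
    (h1 : q1 + (k : Int) * d1 = k1) (h2 : q2 + (k : Int) * d2 = k2) :
    pySign (k1 - q1) = d1 ∧ pySign (k2 - q2) = d2 ∧
      max (k1 - q1).natAbs (k2 - q2).natAbs = k := by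
  have c1 := pySign_cases (k1 - q1)
  have c2 := pySign_cases (k2 - q2)
  have hd1' : d1 = 1 ∨ d1 = 0 ∨ d1 = -1 := by omega
  have hd2' : d2 = 1 ∨ d2 = 0 ∨ d2 = -1 := by omega
  rcases hd1' with rfl | rfl | rfl <;> rcases hd2' with rfl | rfl | rfl <;>
    rcases c1 with ⟨h, e⟩ | ⟨h, e⟩ | ⟨h, e⟩ <;> rcases c2 with ⟨h', e'⟩ | ⟨h', e'⟩ | ⟨h', e'⟩ <;>
      exact ⟨by first | (rw [e]; omega) | rw [e], by first | (rw [e']; omega) | rw [e'], by omega⟩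

theorem main_iff (q1 q2 k1 k2 : Int) (queens : List (Int × Int)) :
    is_attacking_king (q1, q2) (k1, k2) queens = true ↔
      is_attacking_king_alt (q1, q2) (k1, k2) queens = true := by
  have halt_eq : is_attacking_king_alt (q1, q2) (k1, k2) queens =
      (if k1 - q1 = 0 ∧ k2 - q2 = 0 then false
       else if ¬ (k1 - q1 = 0 ∨ k2 - q2 = 0 ∨ (k1 - q1).natAbs = (k2 - q2).natAbs) then false
       else walkB queens (pySign (k1 - q1)) (pySign (k2 - q2))
         (max (k1 - q1).natAbs (k2 - q2).natAbs) q1 q2) := rfl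
  rw [halt_eq]
  simp only [is_attacking_king, List.any_cons, List.any_nil, Bool.or_eq_true, Bool.or_false]
  by_cases hZ : k1 - q1 = 0 ∧ k2 - q2 = 0
  · rw [if_pos hZ]
    simp only [Bool.false_eq_true, iff_false]
    rintro (h | h | h | h | h | h | h | h) <;>
      · rw [walkA_iff] at h
        obtain ⟨k, hk1, -, hpos, -⟩ := h
        simp only [posP, Prod.mk.injEq] at hpos
        omega
  · rw [if_neg hZ]
    by_cases hAl : k1 - q1 = 0 ∨ k2 - q2 = 0 ∨ (k1 - q1).natAbs = (k2 - q2).natAbs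
    · rw [if_neg (not_not_intro hAl), walkB_iff]
      obtain ⟨s1, hgs1⟩ : ∃ s, pySign (k1 - q1) = s := ⟨_, rfl⟩
      obtain ⟨s2, hgs2⟩ : ∃ s, pySign (k2 - q2) = s := ⟨_, rfl⟩
      have hc1 := pySign_cases (k1 - q1)
      have hc2 := pySign_cases (k2 - q2)
      rw [hgs1] at hc1
      rw [hgs2] at hc2
      rw [hgs1, hgs2]
      constructor
      · rintro (h | h | h | h | h | h | h | h) <;>
          · rw [walkA_iff] at h
            obtain ⟨k, hk1, -, hpos, hall⟩ := h
            simp only [posP, Prod.mk.injEq] at hpos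
            obtain ⟨e1, e2, en⟩ :=
              dir_uniq q1 q2 k1 k2 _ _ k hk1 (by decide) (by decide) (by decide) hpos.1 hpos.2
            rw [hgs1] at e1
            rw [hgs2] at e2
            rw [e1, e2, en]
            exact hall
      · intro hB
        have hn1 : 1 ≤ max (k1 - q1).natAbs (k2 - q2).natAbs := by omega
        have o1 := hB 1 (le_refl 1) hn1
        have on := hB (max (k1 - q1).natAbs (k2 - q2).natAbs) hn1 (le_refl _)
        simp only [posP, Ok] at o1 on
        obtain ⟨a1, a2, a3, a4, -⟩ := o1
        obtain ⟨b1, b2, b3, b4, -⟩ := on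
        have hend1 : q1 + ((max (k1 - q1).natAbs (k2 - q2).natAbs : Nat) : Int) * s1 = k1 := by
          rcases hc1 with ⟨h, rfl⟩ | ⟨h, rfl⟩ | ⟨h, rfl⟩ <;> omega
        have hend2 : q2 + ((max (k1 - q1).natAbs (k2 - q2).natAbs : Nat) : Int) * s2 = k2 := by
          rcases hc2 with ⟨h, rfl⟩ | ⟨h, rfl⟩ | ⟨h, rfl⟩ <;> omega
        have h16 : max (k1 - q1).natAbs (k2 - q2).natAbs ≤ 16 := by
          rcases hc1 with ⟨h, rfl⟩ | ⟨h, rfl⟩ | ⟨h, rfl⟩ <;>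
            rcases hc2 with ⟨h', rfl⟩ | ⟨h', rfl⟩ | ⟨h', rfl⟩ <;> omega
        have hA : walkA (k1, k2) queens s1 s2 16 q1 q2 = true := by
          rw [walkA_iff]
          exact ⟨max (k1 - q1).natAbs (k2 - q2).natAbs, hn1, h16,
            by simp only [posP, Prod.mk.injEq]; exact ⟨hend1, hend2⟩, hB⟩
        rcases hc1 with ⟨h1, rfl⟩ | ⟨h1, rfl⟩ | ⟨h1, rfl⟩ <;>
          rcases hc2 with ⟨h2, rfl⟩ | ⟨h2, rfl⟩ | ⟨h2, rfl⟩ <;>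
            first
              | exact absurd (by omega) hZ
              | tauto
    · rw [if_pos hAl]
      simp only [Bool.false_eq_true, iff_false]
      rintro (h | h | h | h | h | h | h | h) <;>
        · rw [walkA_iff] at h
          obtain ⟨k, hk1, -, hpos, -⟩ := h
          simp only [posP, Prod.mk.injEq] at hpos
          omega
-- ===== VERDICT (by name: the statement is the Claim_ definition above) =====
theorem is_attacking_king_spec : Claim_equal_is_attacking_king := by
  intro queen king queens _
  obtain ⟨q1, q2⟩ := queen
  obtain ⟨k1, k2⟩ := king
  unfold Spec_is_attacking_king
  have h := main_iff q1 q2 k1 k2 queens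
  cases hA : is_attacking_king (q1, q2) (k1, k2) queens <;>
    cases hB : is_attacking_king_alt (q1, q2) (k1, k2) queens <;> simp_all
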